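-- pv_equiv track=rewrite | github.com/Oluwateezzy/data_structure | interview12.py | numTriplets
-- ===== SOURCE A (Python) =====
-- import collections
-- from typing import List
--
-- def numTriplets(nums1: List[int], nums2: List[int]) -> int:
--     def count_pairs(nums: List[int], target_dict: collections.Counter) -> int:
--         count = 0
--         for j in range(len(nums)):
--             for k in range(j + 1, len(nums)):
--                 product = nums[j] * nums[k]
--                 if product in target_dict:
--                     count += target_dict[product]
--         return count
--
--     nums_dict1 = collections.Counter(num * num for num in nums1)
--     nums_dict2 = collections.Counter(num * num for num in nums2)
--
--     count = 0
--     count += count_pairs(nums2, nums_dict1)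
--     count += count_pairs(nums1, nums_dict2)
--
--     return count
-- ===== SOURCE B (Python) =====
-- import collections
-- from typing import List
--
--
-- def numTriplets(nums1: List[int], nums2: List[int]) -> int:
--     # Inverted indexing: tabulate pair-products of each array once,
--     # then a flat pass over singleton squares of the other array.
--     def pair_products(nums: List[int]) -> collections.Counter:
--         c = collections.Counter()
--         for j in range(len(nums)):
--             for k in range(j + 1, len(nums)):
--                 c[nums[j] * nums[k]] += 1
--         return c
--
--     prod1 = pair_products(nums1)
--     prod2 = pair_products(nums2)
--     return sum(prod2[n * n] for n in nums1) + sum(prod1[n * n] for n in nums2)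
-- ===== Notes on version B (the rewrite author's own statement) =====
-- stated objective: alternative
-- what changed: The indexed side is inverted: B builds a Counter of all pair-products (nums[j]*nums[k], j<k) of each array and answers with one flat pass summing lookups of the other array's singleton squares, instead of A's Counter of squares looked up inside the nested pair loops.
import Mathlib
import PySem

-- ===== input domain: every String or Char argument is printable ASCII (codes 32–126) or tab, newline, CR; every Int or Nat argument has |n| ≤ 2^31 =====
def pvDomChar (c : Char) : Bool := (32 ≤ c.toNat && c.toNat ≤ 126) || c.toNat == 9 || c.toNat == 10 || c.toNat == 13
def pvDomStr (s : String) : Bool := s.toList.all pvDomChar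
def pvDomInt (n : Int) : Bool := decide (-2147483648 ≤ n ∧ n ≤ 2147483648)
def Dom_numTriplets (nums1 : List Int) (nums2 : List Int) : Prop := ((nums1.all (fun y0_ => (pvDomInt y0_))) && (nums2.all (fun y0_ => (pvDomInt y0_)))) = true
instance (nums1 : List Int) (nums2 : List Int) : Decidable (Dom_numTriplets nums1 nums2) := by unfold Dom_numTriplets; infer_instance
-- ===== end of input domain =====

-- B inverts the indexed side: a Counter of pair-products per array with a flat lookup pass
-- over the other array's squares, instead of A's Counter of squares looked up inside nested pair loops.

-- ===== PORT A =====
-- helper: A's inner `count_pairs`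
def pvCountPairs (nums : List Int) (target_dict : PySem.Dict Int Int) : Int :=
  (PySem.List.pyRange 0 (PySem.List.len nums) 1).foldl (fun count j =>
    (PySem.List.pyRange (j + 1) (PySem.List.len nums) 1).foldl (fun count k =>
      let product := PySem.List.pyGetD nums j 0 * PySem.List.pyGetD nums k 0
      if target_dict.contains product then count + target_dict.getD product 0 else count)
      count) 0

def numTriplets (nums1 : List Int) (nums2 : List Int) : Int :=
  let nums_dict1 := PySem.Dict.counter (nums1.map fun num => num * num)
  let nums_dict2 := PySem.Dict.counter (nums2.map fun num => num * num)
  let count : Int := 0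
  let count := count + pvCountPairs nums2 nums_dict1
  let count := count + pvCountPairs nums1 nums_dict2
  count

-- ===== PORT B =====
-- helper: B's `pair_products`
def pvPairProducts (nums : List Int) : PySem.Dict Int Int :=
  (PySem.List.pyRange 0 (PySem.List.len nums) 1).foldl (fun c j =>
    (PySem.List.pyRange (j + 1) (PySem.List.len nums) 1).foldl (fun c k =>
      c.modify (PySem.List.pyGetD nums j 0 * PySem.List.pyGetD nums k 0) 0 (· + 1))
      c) PySem.Dict.empty

def numTriplets_alt (nums1 : List Int) (nums2 : List Int) : Int :=
  let prod1 := pvPairProducts nums1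
  let prod2 := pvPairProducts nums2
  (nums1.map fun n => prod2.getD (n * n) 0).sum + (nums2.map fun n => prod1.getD (n * n) 0).sum

-- ===== PRECONDITION & SPEC =====
def Spec_numTriplets (nums1 : List Int) (nums2 : List Int) (out : Int) : Prop := out = numTriplets_alt nums1 nums2
instance (nums1 : List Int) (nums2 : List Int) (out : Int) : Decidable (Spec_numTriplets nums1 nums2 out) := by unfold Spec_numTriplets; infer_instance

-- ===== CLAIM (what is proved, stated in full; the proofs are below) =====
def Claim_equal_numTriplets : Prop := ∀ (nums1 : List Int) (nums2 : List Int), Dom_numTriplets nums1 nums2 → Spec_numTriplets nums1 nums2 (numTriplets nums1 nums2)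

-- ===== LEMMAS AND PROOFS =====

-- the list of all pair products nums[j]*nums[k], j < k, in loop order
def pvP (nums : List Int) : List Int :=
  (PySem.List.pyRange 0 (PySem.List.len nums) 1).flatMap (fun j =>
    (PySem.List.pyRange (j + 1) (PySem.List.len nums) 1).map (fun k =>
      PySem.List.pyGetD nums j 0 * PySem.List.pyGetD nums k 0))

theorem pv_foldl_flatMap {α β : Type} (l : List α) (g : α → List β) {γ : Type}
    (f : γ → β → γ) (init : γ) :
    (l.flatMap g).foldl f init = l.foldl (fun acc x => (g x).foldl f acc) init := by
  induction l generalizing init with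
  | nil => rfl
  | cons x xs ih => simp [List.flatMap_cons, List.foldl_append, ih]

-- A's count_pairs over any dict is a fold over the pair-product list
theorem pvCountPairs_eq_foldl (nums : List Int) (d : PySem.Dict Int Int) :
    pvCountPairs nums d =
      (pvP nums).foldl (fun count product =>
        if d.contains product then count + d.getD product 0 else count) 0 := by
  unfold pvCountPairs pvP
  rw [pv_foldl_flatMap]
  simp [List.foldl_map]

-- A's count_pairs against a Counter of sqs = Σ over pair products of (count in sqs)
theorem pvCountPairs_counter (nums sqs : List Int) :
    pvCountPairs nums (PySem.Dict.counter sqs) =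
      ((pvP nums).map (fun p => (sqs.count p : Int))).sum := by
  rw [pvCountPairs_eq_foldl]
  refine (PySem.List.foldl_congr_mem (pvP nums) _
      (fun count product => count + (PySem.Dict.counter sqs).getD product 0) 0 ?_).trans ?_
  · intro acc x _
    by_cases h : (PySem.Dict.counter sqs).contains x
    · simp [h]
    · simp [h, PySem.Dict.getD_of_not_contains _ _ (by simpa using h)]
  · rw [PySem.List.foldl_add]
    simp [PySem.Dict.getD_counter]

-- B's pair_products dict IS the Counter of the pair-product list
theorem pvPairProducts_eq_counter (nums : List Int) :
    pvPairProducts nums = PySem.Dict.counter (pvP nums) := by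
  unfold pvPairProducts pvP
  rw [PySem.Dict.counter_eq_foldl, pv_foldl_flatMap]
  simp [List.foldl_map]

-- double-counting symmetry
theorem pv_sum_count_comm (xs ys : List Int) :
    (xs.map fun x => (ys.count x : Int)).sum = (ys.map fun y => (xs.count y : Int)).sum := by
  induction xs with
  | nil => simp
  | cons x xs ih =>
    simp only [List.map_cons, List.sum_cons, ih]
    have h1 : (ys.map fun y => ((x :: xs).count y : Int)).sum
        = (ys.map fun y => (xs.count y : Int) + if (x == y) = true then 1 else 0).sum := by
      congr 1
      apply List.map_congr_left
      intro y _
      by_cases h : x = y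
      · simp [h]
      · simp [h]
    have h2 : (ys.map fun y => if (x == y) = true then (1:Int) else 0).sum
        = (ys.count x : Int) := by
      rw [PySem.List.sum_map_ite_one_zero]
      congr 1
      rw [List.count_eq_countP]
      exact List.countP_congr (fun a _ => by rw [BEq.comm])
    rw [h1, PySem.List.sum_map_add_int, h2]
    ring

-- one side of the answer
theorem pv_side (a b : List Int) :
    (a.map fun n => (pvPairProducts b).getD (n * n) 0).sum
      = pvCountPairs b (PySem.Dict.counter (a.map fun num => num * num)) := by
  rw [pvCountPairs_counter, pvPairProducts_eq_counter]
  have h1 : (a.map fun n => (PySem.Dict.counter (pvP b)).getD (n * n) 0)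
      = ((a.map fun num => num * num).map fun s => ((pvP b).count s : Int)) := by
    simp [List.map_map, Function.comp, PySem.Dict.getD_counter]
  rw [h1, pv_sum_count_comm]

-- ===== VERDICT (by name: the statement is the Claim_ definition above) =====
theorem numTriplets_spec : Claim_equal_numTriplets := by
  intro nums1 nums2 _
  unfold Spec_numTriplets numTriplets numTriplets_alt
  simp only
  rw [pv_side nums1 nums2, pv_side nums2 nums1]
  ring
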